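-- pv_equiv track=rewrite | github.com/Floorp-Projects/Floorp | taskcluster/taskgraph/try_option_syntax.py | escape_whitespace_in_brackets
-- ===== SOURCE A (Python) =====
-- def escape_whitespace_in_brackets(input_str):
--     '''
--     In tests you may restrict them by platform [] inside of the brackets
--     whitespace may occur this is typically invalid shell syntax so we escape it
--     with backslash sequences    .
--     '''
--     result = ""
--     in_brackets = False
--     for char in input_str:
--         if char == '[':
--             in_brackets = True
--             result += char
--             continue
--
--         if char == ']':
--             in_brackets = False
--             result += char
--             continue
--
--         if char == ' ' and in_brackets:
--             result += '\ '
--             continue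
--
--         result += char
--
--     return result
-- ===== SOURCE B (Python) =====
-- def escape_whitespace_in_brackets(input_str):
--     parts = []
--     for seg in input_str.split(']'):
--         i = seg.find('[')
--         if i < 0:
--             parts.append(seg)
--         else:
--             parts.append(seg[:i] + ''.join('\\ ' if c == ' ' else c for c in seg[i:]))
--     return ']'.join(parts)
-- ===== Notes on version B (the rewrite author's own statement) =====
-- stated objective: faster
-- what changed: Replaces the char-by-char in_brackets state machine with a region scan: split the string on the closing bracket, escape spaces from the first opening bracket of each piece to its end with bulk str operations, and rejoin.
import Mathlib
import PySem

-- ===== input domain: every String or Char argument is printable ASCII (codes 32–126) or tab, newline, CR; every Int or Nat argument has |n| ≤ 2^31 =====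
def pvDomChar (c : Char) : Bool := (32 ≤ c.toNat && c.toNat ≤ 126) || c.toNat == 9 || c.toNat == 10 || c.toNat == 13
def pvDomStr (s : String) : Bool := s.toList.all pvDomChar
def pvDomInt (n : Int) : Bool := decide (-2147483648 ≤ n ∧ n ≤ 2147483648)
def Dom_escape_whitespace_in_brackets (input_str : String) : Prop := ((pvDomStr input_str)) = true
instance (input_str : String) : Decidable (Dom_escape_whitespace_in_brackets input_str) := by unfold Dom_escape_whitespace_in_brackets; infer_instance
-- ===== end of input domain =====

-- B replaces A's char-by-char in_brackets state machine by a region scan (split on the closing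
-- bracket, escape spaces from the first opening bracket of each piece, rejoin); measured faster
-- in Python (bulk str operations instead of a per-character loop).

-- ===== PORT A =====
-- the for-loop over the characters, state = (result, in_brackets)
def escape_whitespace_in_brackets (input_str : String) : String :=
  String.mk (input_str.toList.foldl
    (fun (s : List Char × Bool) c =>
      if c == '[' then (s.1 ++ [c], true)
      else if c == ']' then (s.1 ++ [c], false)
      else if c == ' ' && s.2 then (s.1 ++ ['\\', ' '], s.2)
      else (s.1 ++ [c], s.2))
    ([], false)).1

-- ===== PORT B =====
-- per-segment escaping: seg if seg.find('[') < 0 else seg[:i] + ''.join('\ ' if c==' ' else c for c in seg[i:])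
def pvEscSeg (seg : List Char) : List Char :=
  let i := PySem.Chars.find seg ['[']
  if i < 0 then seg
  else PySem.List.slice seg none (some i) ++
       (PySem.List.slice seg (some i) none).flatMap
         (fun c => if c == ' ' then ['\\', ' '] else [c])

def escape_whitespace_in_brackets_alt (input_str : String) : String :=
  String.mk (PySem.Chars.join [']']
    ((PySem.Chars.splitOn input_str.toList [']']).map pvEscSeg))

-- ===== PRECONDITION & SPEC =====
def Spec_escape_whitespace_in_brackets (input_str : String) (out : String) : Prop := out = escape_whitespace_in_brackets_alt input_str
instance (input_str : String) (out : String) : Decidable (Spec_escape_whitespace_in_brackets input_str out) := by unfold Spec_escape_whitespace_in_brackets; infer_instance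

-- ===== CLAIM (what is proved, stated in full; the proofs are below) =====
def Claim_equal_escape_whitespace_in_brackets : Prop := ∀ (input_str : String), Dom_escape_whitespace_in_brackets input_str → Spec_escape_whitespace_in_brackets input_str (escape_whitespace_in_brackets input_str)

-- ===== LEMMAS AND PROOFS =====

-- A's loop as a structural recursion on the character list

-- A's loop as a structural recursion on the character list
def pvGo : Bool → List Char → List Char
  | _, [] => []
  | b, c :: cs =>
    if c == '[' then c :: pvGo true cs
    else if c == ']' then c :: pvGo false cs
    else if c == ' ' && b then '\\' :: ' ' :: pvGo b cs
    else c :: pvGo b cs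

theorem pvFoldl_go (cs : List Char) (acc : List Char) (b : Bool) :
    (cs.foldl (fun (s : List Char × Bool) c =>
      if c == '[' then (s.1 ++ [c], true)
      else if c == ']' then (s.1 ++ [c], false)
      else if c == ' ' && s.2 then (s.1 ++ ['\\', ' '], s.2)
      else (s.1 ++ [c], s.2)) (acc, b)).1 = acc ++ pvGo b cs := by
  induction cs generalizing acc b with
  | nil => simp [pvGo]
  | cons c cs ih =>
    rw [List.foldl_cons]
    by_cases h1 : c == '['
    · rw [if_pos h1, ih]; simp [pvGo, h1]
    · by_cases h2 : c == ']'
      · rw [if_neg h1, if_pos h2, ih]; simp [pvGo, h1, h2]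
      · by_cases h3 : (c == ' ' && b) = true
        · rw [if_neg h1, if_neg h2, if_pos h3, ih]; simp [pvGo, h1, h2, h3]
        · rw [if_neg h1, if_neg h2, if_neg h3, ih]; simp [pvGo, h1, h2, h3]

-- PySem's splitOn on a one-character separator is Mathlib's List.splitOn
theorem pvSplitGo (a : Char) (l : List Char) : ∀ (fuel : Nat) (cur : List Char) (acc : List (List Char)),
    l.length < fuel →
    PySem.Chars.splitOn.go [a] fuel l cur acc
      = acc.reverse ++ List.modifyHead (cur.reverse ++ ·) (List.splitOn a l) := by
  induction l with
  | nil =>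
    intro fuel cur acc h
    obtain ⟨f, rfl⟩ : ∃ f, fuel = f + 1 := ⟨fuel - 1, by omega⟩
    simp [PySem.Chars.splitOn.go, List.splitOn_nil]
  | cons c cs ih =>
    intro fuel cur acc h
    obtain ⟨f, rfl⟩ : ∃ f, fuel = f + 1 := ⟨fuel - 1, by omega⟩
    simp only [List.length_cons, Nat.add_lt_add_iff_right] at h
    rw [PySem.Chars.splitOn.go]
    by_cases hc : a = c
    · subst hc
      have hp : [a].isPrefixOf (a :: cs) = true := by simp [List.isPrefixOf]
      rw [if_pos hp]
      have hd : List.drop [a].length (a :: cs) = cs := by simp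
      rw [hd]
      rw [ih f [] (cur.reverse :: acc) (by omega)]
      have hs : List.splitOn a (a :: cs) = [] :: List.splitOn a cs := by
        simp [List.splitOn, List.splitOnP_cons]
      rw [hs]
      simp
      cases List.splitOn a cs <;> simp
    · have hp : [a].isPrefixOf (c :: cs) = false := by simp [List.isPrefixOf]; exact hc
      rw [if_neg (by simp [hp])]
      rw [ih f (c :: cur) acc (by omega)]
      have hs : List.splitOn a (c :: cs) = List.modifyHead (List.cons c) (List.splitOn a cs) := by
        simp [List.splitOn, List.splitOnP_cons, beq_eq_false_iff_ne.mpr (Ne.symm hc)]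
      rw [hs, List.modifyHead_modifyHead]
      simp [Function.comp_def]

theorem pvSplitOn_eq (a : Char) (cs : List Char) :
    PySem.Chars.splitOn cs [a] = List.splitOn a cs := by
  rw [PySem.Chars.splitOn, pvSplitGo a cs (cs.length + 1) [] [] (by omega)]
  simp
  cases List.splitOn a cs <;> simp

-- every piece of List.splitOn a is a-free
theorem pvSplitOn_not_mem (a : Char) (cs : List Char) :
    ∀ seg ∈ List.splitOn a cs, a ∉ seg := by
  induction cs with
  | nil => simp [List.splitOn_nil]
  | cons c cs ih =>
    by_cases hc : c = a
    · subst hc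
      have hs : List.splitOn c (c :: cs) = [] :: List.splitOn c cs := by
        simp [List.splitOn, List.splitOnP_cons]
      rw [hs]
      intro seg hseg
      rcases List.mem_cons.mp hseg with h | h
      · simp [h]
      · exact ih seg h
    · have hs : List.splitOn a (c :: cs) = List.modifyHead (List.cons c) (List.splitOn a cs) := by
        simp [List.splitOn, List.splitOnP_cons, beq_eq_false_iff_ne.mpr hc]
      rw [hs]
      obtain ⟨h0, tl, hsp⟩ : ∃ h0 tl, List.splitOn a cs = h0 :: tl := by
        rcases he : List.splitOn a cs with _ | ⟨h0, tl⟩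
        · exact absurd he (by simp [List.splitOn]; exact List.splitOnP_ne_nil _ _)
        · exact ⟨h0, tl, rfl⟩
      rw [hsp]
      intro seg hseg
      rcases List.mem_cons.mp hseg with h | h
      · subst h
        simp only [List.mem_cons, not_or]
        exact ⟨fun he => hc he.symm, ih h0 (by rw [hsp]; exact List.mem_cons_self)⟩
      · exact ih seg (by rw [hsp]; exact List.mem_cons_of_mem _ h)

theorem pvSplitOn_ne_nil (a : Char) (cs : List Char) : List.splitOn a cs ≠ [] := by
  simp [List.splitOn]; exact List.splitOnP_ne_nil _ _

-- Chars.find of a singleton pattern at the first occurrence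
theorem pvFind_eq (l : List Char) (a : Char) (k : Nat)
    (h1 : [a] <+: l.drop k) (h2 : ∀ i < k, ¬ [a] <+: l.drop i) :
    PySem.Chars.find l [a] = k := by
  have hinf : [a] <:+: l := h1.isInfix.trans (l.drop_suffix k).isInfix
  have hn : 0 ≤ PySem.Chars.find l [a] := (PySem.Chars.find_nonneg_iff _ _).mpr hinf
  obtain ⟨hpre, hmin⟩ := PySem.Chars.find_spec hn
  have : (PySem.Chars.find l [a]).toNat = k := by
    rcases Nat.lt_trichotomy (PySem.Chars.find l [a]).toNat k with h | h | h
    · exact absurd hpre (h2 _ h)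
    · exact h
    · exact absurd h1 (hmin k h)
  omega

-- the escape map applied from the first '[' on
def pvEsc (seg : List Char) : List Char :=
  seg.flatMap (fun c => if c == ' ' then ['\\', ' '] else [c])

theorem pvEscSeg_no (seg : List Char) (h : '[' ∉ seg) : pvEscSeg seg = seg := by
  have : PySem.Chars.find seg ['['] = -1 :=
    (PySem.Chars.find_eq_neg_one_iff _ _).mpr (fun hin => h (hin.subset (List.mem_singleton_self _)))
  simp [pvEscSeg, this]

theorem pvEscSeg_pre (pre suf : List Char) (h : '[' ∉ pre) :
    pvEscSeg (pre ++ '[' :: suf) = pre ++ pvEsc ('[' :: suf) := by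
  have hfind : PySem.Chars.find (pre ++ '[' :: suf) ['['] = pre.length := by
    apply pvFind_eq
    · rw [List.drop_left]; exact ⟨suf, rfl⟩
    · intro i hi hpre
      obtain ⟨t, ht⟩ := hpre
      have h0 : ((pre ++ '[' :: suf).drop i)[0]? = some '[' := by rw [← ht]; rfl
      rw [List.getElem?_drop, Nat.add_zero, List.getElem?_append_left hi] at h0
      exact h (List.mem_of_getElem? h0)
  rw [pvEscSeg, hfind]
  rw [if_neg (by omega)]
  rw [PySem.List.slice_to _ (by omega), PySem.List.slice_from _ (by omega)]
  simp [pvEsc]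

-- processing a bracket-free segment from state false copies it
theorem pvGo_false_copy (seg : List Char) (h1 : '[' ∉ seg) (h2 : ']' ∉ seg) (r : List Char) :
    pvGo false (seg ++ r) = seg ++ pvGo false r := by
  induction seg with
  | nil => simp
  | cons c cs ih =>
    simp only [List.mem_cons, not_or] at h1 h2
    rw [List.cons_append, pvGo]
    rw [if_neg (by simp; exact fun he => h1.1 he.symm),
        if_neg (by simp; exact fun he => h2.1 he.symm)]
    simp only [Bool.and_false, Bool.false_eq_true, if_false]
    rw [ih h1.2 h2.2, List.cons_append]

-- processing a ']'-free segment from state true escapes its spaces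
theorem pvGo_true_esc (seg : List Char) (h2 : ']' ∉ seg) (r : List Char) :
    pvGo true (seg ++ r) = pvEsc seg ++ pvGo true r := by
  induction seg with
  | nil => simp [pvEsc]
  | cons c cs ih =>
    simp only [List.mem_cons, not_or] at h2
    rw [List.cons_append, pvGo]
    by_cases h1 : c == '['
    · rw [if_pos h1, ih h2.2]
      have hc : c = '[' := by simpa using h1
      subst hc; simp [pvEsc]
    · rw [if_neg h1, if_neg (by simp; exact fun he => h2.1 he.symm)]
      by_cases hs : c == ' '
      · rw [if_pos (by simp [hs]), ih h2.2]
        have hc : c = ' ' := by simpa using hs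
        subst hc; simp [pvEsc]
      · rw [if_neg (by simp [hs]), ih h2.2]
        have hc : c ≠ ' ' := by simpa using hs
        simp [pvEsc, hc]

-- split a list at the first occurrence of a member
theorem pvFirstSplit (a : Char) (l : List Char) (h : a ∈ l) :
    ∃ pre suf, l = pre ++ a :: suf ∧ a ∉ pre := by
  induction l with
  | nil => cases h
  | cons c cs ih =>
    by_cases hc : c = a
    · subst hc; exact ⟨[], cs, rfl, by simp⟩
    · obtain ⟨pre, suf, hl, hp⟩ := ih (by
        rcases List.mem_cons.mp h with h' | h'
        · exact absurd h'.symm hc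
        · exact h')
      exact ⟨c :: pre, suf, by rw [List.cons_append, hl],
        by simp only [List.mem_cons, not_or]; exact ⟨fun he => hc he.symm, hp⟩⟩

-- one ']'-free segment from state false, with arbitrary continuation
theorem pvGo_seg (seg : List Char) (h2 : ']' ∉ seg) (r : List Char) :
    pvGo false (seg ++ r) = pvEscSeg seg ++ pvGo (decide ('[' ∈ seg)) r := by
  by_cases hm : '[' ∈ seg
  · obtain ⟨pre, suf, hl, hp⟩ := pvFirstSplit '[' seg hm
    subst hl
    have h2p : ']' ∉ pre := fun hx => h2 (List.mem_append_left _ hx)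
    have h2s : ']' ∉ suf := fun hx => h2 (List.mem_append_right _ (List.mem_cons_of_mem _ hx))
    rw [List.append_assoc, pvGo_false_copy pre hp h2p, List.cons_append, pvGo]
    rw [if_pos (by simp)]
    rw [pvGo_true_esc suf h2s]
    rw [pvEscSeg_pre pre suf hp]
    simp [pvEsc, hm]
  · rw [pvEscSeg_no seg hm, pvGo_false_copy seg hm h2]
    simp [hm]

theorem pvMain (segs : List (List Char)) (hne : segs ≠ [])
    (hfree : ∀ seg ∈ segs, ']' ∉ seg) :
    pvGo false ([']'].intercalate segs) = [']'].intercalate (segs.map pvEscSeg) := by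
  induction segs with
  | nil => exact absurd rfl hne
  | cons seg rest ih =>
    cases rest with
    | nil =>
      simp only [List.map_cons, List.map_nil]
      rw [show [']'].intercalate [seg] = seg by simp [List.intercalate],
          show [']'].intercalate [pvEscSeg seg] = pvEscSeg seg by simp [List.intercalate]]
      have := pvGo_seg seg (hfree seg List.mem_cons_self) []
      simpa [pvGo] using this
    | cons seg2 rest2 =>
      have hi1 : [']'].intercalate (seg :: seg2 :: rest2) = seg ++ ']' :: [']'].intercalate (seg2 :: rest2) := by
        simp [List.intercalate, List.intersperse]
      have hi2 : [']'].intercalate (pvEscSeg seg :: pvEscSeg seg2 :: rest2.map pvEscSeg)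
          = pvEscSeg seg ++ ']' :: [']'].intercalate (pvEscSeg seg2 :: rest2.map pvEscSeg) := by
        simp [List.intercalate, List.intersperse]
      simp only [List.map_cons]
      rw [hi1, hi2]
      rw [pvGo_seg seg (hfree seg List.mem_cons_self) (']' :: [']'].intercalate (seg2 :: rest2))]
      have hstep : ∀ b t, pvGo b (']' :: t) = ']' :: pvGo false t := by
        intro b t; rw [pvGo]; simp
      rw [hstep]
      rw [ih (by simp) (fun sg hsg => hfree sg (List.mem_cons_of_mem _ hsg))]
      simp only [List.map_cons]

-- ===== VERDICT (by name: the statement is the Claim_ definition above) =====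
theorem escape_whitespace_in_brackets_spec : Claim_equal_escape_whitespace_in_brackets := by
  intro s _
  unfold Spec_escape_whitespace_in_brackets escape_whitespace_in_brackets escape_whitespace_in_brackets_alt
  rw [pvFoldl_go]
  rw [pvSplitOn_eq]
  rw [show PySem.Chars.join = fun sep parts => sep.intercalate parts from rfl]
  have hfree := pvSplitOn_not_mem ']' s.toList
  have hne := pvSplitOn_ne_nil ']' s.toList
  have hrec : [']'].intercalate (List.splitOn ']' s.toList) = s.toList :=
    List.intercalate_splitOn _ _
  simp only [List.nil_append]
  conv_lhs => rw [← hrec]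
  rw [pvMain _ hne hfree]
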